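-- pv_equiv track=rewrite | github.com/Miav771/advent_of_code_2023 | day14/s2.py | shiftline
-- ===== SOURCE A (Python) =====
-- def shiftline(line):
--     line = list(line)
--     seen_moveable_rocks = 0
--     for x in range(len(line)):
--         if line[x] == "#":
--             line[x - seen_moveable_rocks : x] = ["O"] * seen_moveable_rocks
--             seen_moveable_rocks = 0
--         elif line[x] == "O":
--             line[x] = "."
--             seen_moveable_rocks += 1
--     if seen_moveable_rocks:
--         line[-seen_moveable_rocks:] = ["O"] * seen_moveable_rocks
--     return tuple(line)
-- ===== SOURCE B (Python) =====
-- def shiftline(line):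
--     out = []
--     seg = []
--     for c in line:
--         if c == "#":
--             out += _shift_segment(seg)
--             out.append("#")
--             seg = []
--         else:
--             seg.append(c)
--     out += _shift_segment(seg)
--     return tuple(out)
--
--
-- def _shift_segment(seg):
--     k = seg.count("O")
--     cleaned = ["." if c == "O" else c for c in seg]
--     return cleaned[:len(seg) - k] + ["O"] * k
-- ===== Notes on version B (the rewrite author's own statement) =====
-- stated objective: simpler
-- what changed: B splits the line into '#'-bounded segments and rebuilds each whole segment (non-rock characters with 'O's turned to '.', truncated, plus trailing 'O's) in one accumulating pass, instead of A's index loop with a running rock counter and in-place slice write-backs into the mutated list.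
import Mathlib
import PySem

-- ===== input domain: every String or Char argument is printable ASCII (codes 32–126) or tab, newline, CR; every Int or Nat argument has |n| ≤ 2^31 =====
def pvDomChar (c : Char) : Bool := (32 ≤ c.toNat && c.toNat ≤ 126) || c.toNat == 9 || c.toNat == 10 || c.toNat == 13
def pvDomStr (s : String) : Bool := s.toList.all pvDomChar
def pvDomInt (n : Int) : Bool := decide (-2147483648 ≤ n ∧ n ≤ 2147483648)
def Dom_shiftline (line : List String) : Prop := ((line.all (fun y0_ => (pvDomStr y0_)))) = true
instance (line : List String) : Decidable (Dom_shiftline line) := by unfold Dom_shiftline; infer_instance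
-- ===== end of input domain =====

-- B: splits the line into '#'-bounded segments and rebuilds each segment whole
-- (cleaned prefix + trailing rocks), instead of A's index loop with in-place
-- slice write-backs; objective: simpler decomposition, same O(n) cost.


-- ===== PORT A =====
-- the for-x-in-range loop, carried as recursion on the index x; the list l is
-- the mutated `line`, `seen` is seen_moveable_rocks.  The slice assignment
-- line[x-seen:x] = ["O"]*seen is l.take (x-seen) ++ replicate seen "O" ++ l.drop x
-- (exact: the loop keeps 0 ≤ x-seen, so Python's x-seen never goes negative).
def shiftlineLoop (l : List String) (n x seen : Nat) : List String × Nat :=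
  if _h : x < n then
    if l.getD x "" = "#" then
      shiftlineLoop (l.take (x - seen) ++ List.replicate seen "O" ++ l.drop x) n (x+1) 0
    else if l.getD x "" = "O" then
      shiftlineLoop (l.set x ".") n (x+1) (seen+1)
    else
      shiftlineLoop l n (x+1) seen
  else (l, seen)
termination_by n - x

def shiftline (line : List String) : List String :=
  let p := shiftlineLoop line line.length 0 0
  -- line[-seen:] = ["O"]*seen  (only when seen ≠ 0; the loop keeps seen ≤ len)
  if p.2 ≠ 0 then p.1.take (p.1.length - p.2) ++ List.replicate p.2 "O" else p.1

-- ===== PORT B =====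
-- _shift_segment from Source B
def shiftSegment (seg : List String) : List String :=
  let k := seg.count "O"
  (seg.map (fun c => if c = "O" then "." else c)).take (seg.length - k)
    ++ List.replicate k "O"

-- the for-c-in-line loop of Source B: state (out, seg)
def shiftline_alt (line : List String) : List String :=
  let p := line.foldl
    (fun (st : List String × List String) c =>
      if c = "#" then (st.1 ++ shiftSegment st.2 ++ ["#"], ([] : List String))
      else (st.1, st.2 ++ [c]))
    ([], [])
  p.1 ++ shiftSegment p.2

-- ===== PRECONDITION & SPEC =====
def Spec_shiftline (line : List String) (out : List String) : Prop := out = shiftline_alt line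
instance (line : List String) (out : List String) : Decidable (Spec_shiftline line out) := by unfold Spec_shiftline; infer_instance

-- ===== CLAIM (what is proved, stated in full; the proofs are below) =====
def Claim_equal_shiftline : Prop := ∀ (line : List String), Dom_shiftline line → Spec_shiftline line (shiftline line)

-- ===== LEMMAS AND PROOFS =====

-- intermediate spec: process the remaining characters `rest`, `pre` being the
-- already-rewritten prefix and `seen` the pending rock count
def slSpec (rest pre : List String) (seen : Nat) : List String × Nat :=
  match rest with
  | [] => (pre, seen)
  | c :: r =>
    if c = "#" then slSpec r (pre.take (pre.length - seen) ++ List.replicate seen "O" ++ ["#"]) 0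
    else if c = "O" then slSpec r (pre ++ ["."]) (seen+1)
    else slSpec r (pre ++ [c]) seen

def slFix (p : List String × Nat) : List String :=
  if p.2 ≠ 0 then p.1.take (p.1.length - p.2) ++ List.replicate p.2 "O" else p.1

lemma getD_append_len (pre r : List String) (c d : String) :
    (pre ++ c :: r).getD pre.length d = c := by
  induction pre with
  | nil => rfl
  | cons a t ih => simp

lemma set_append_len (pre r : List String) (c d : String) :
    (pre ++ c :: r).set pre.length d = pre ++ d :: r := by
  induction pre with
  | nil => rfl
  | cons a t ih => simp [ih]

lemma take_append_plus {A : Type} (l1 l2 : List A) (j : Nat) :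
    (l1 ++ l2).take (l1.length + j) = l1 ++ l2.take j := by
  rw [List.take_append]
  simp

lemma shiftlineLoop_eq_spec : ∀ (rest pre : List String) (seen x n : Nat),
    seen ≤ pre.length → x = pre.length → n = pre.length + rest.length →
    shiftlineLoop (pre ++ rest) n x seen = slSpec rest pre seen := by
  intro rest
  induction rest with
  | nil =>
    intro pre seen x n _ hx hn
    subst hx; subst hn
    rw [shiftlineLoop]
    simp [slSpec]
  | cons c r ih =>
    intro pre seen x n hle hx hn
    subst hx; subst hn
    rw [shiftlineLoop]
    have hlt : pre.length < pre.length + (c :: r).length := by simp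
    have hget : (pre ++ c :: r).getD pre.length "" = c := getD_append_len pre r c ""
    rw [dif_pos hlt, hget]
    by_cases hc : c = "#"
    · have htk : (pre ++ c :: r).take (pre.length - seen) = pre.take (pre.length - seen) :=
        List.take_append_of_le_length (Nat.sub_le _ _)
      have hdr : (pre ++ c :: r).drop pre.length = c :: r := by simp
      have harr : pre.take (pre.length - seen) ++ List.replicate seen "O" ++ (c :: r)
          = (pre.take (pre.length - seen) ++ List.replicate seen "O" ++ [c]) ++ r := by
        simp
      have hlen : (pre.take (pre.length - seen) ++ List.replicate seen "O" ++ [c]).length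
          = pre.length + 1 := by
        simp; omega
      rw [if_pos hc, htk, hdr, harr,
        ih (pre.take (pre.length - seen) ++ List.replicate seen "O" ++ [c]) 0
          (pre.length + 1) (pre.length + (c :: r).length)
          (by simp) hlen.symm (by simp; omega)]
      simp [slSpec, hc]
    · by_cases ho : c = "O"
      · have hst : (pre ++ c :: r).set pre.length "." = pre ++ "." :: r :=
          set_append_len pre r c "."
        have harr : pre ++ "." :: r = (pre ++ ["."]) ++ r := by simp
        rw [if_neg hc, if_pos ho, hst, harr,
          ih (pre ++ ["."]) (seen + 1) (pre.length + 1) (pre.length + (c :: r).length)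
            (by simp; omega) (by simp) (by simp; omega)]
        simp [slSpec, ho]
      · have harr : pre ++ c :: r = (pre ++ [c]) ++ r := by simp
        rw [if_neg hc, if_neg ho, harr,
          ih (pre ++ [c]) seen (pre.length + 1) (pre.length + (c :: r).length)
            (by simp; omega) (by simp) (by simp; omega)]
        simp [slSpec, hc, ho]

lemma shiftline_eq_fix_spec (line : List String) :
    shiftline line = slFix (slSpec line [] 0) := by
  have h := shiftlineLoop_eq_spec line [] 0 0 line.length (by simp) (by simp) (by simp)
  simp only [List.nil_append] at h
  simp [shiftline, h, slFix]

lemma alt_eq_fix_spec : ∀ (rest out seg : List String),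
    (let p := rest.foldl
        (fun (st : List String × List String) c =>
          if c = "#" then (st.1 ++ shiftSegment st.2 ++ ["#"], ([] : List String))
          else (st.1, st.2 ++ [c]))
        (out, seg)
     p.1 ++ shiftSegment p.2)
      = slFix (slSpec rest (out ++ seg.map (fun c => if c = "O" then "." else c)) (seg.count "O")) := by
  intro rest
  induction rest with
  | nil =>
    intro out seg
    have hk : seg.count "O" ≤ seg.length := List.count_le_length
    simp only [List.foldl_nil, slSpec, slFix, shiftSegment]
    by_cases h0 : seg.count "O" = 0
    · simp [h0, List.take_of_length_le]
    · rw [if_pos h0]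
      have hln : (out ++ seg.map (fun c => if c = "O" then "." else c)).length - seg.count "O"
          = out.length + (seg.length - seg.count "O") := by simp; omega
      rw [hln, take_append_plus]
      simp
  | cons c r ih =>
    intro out seg
    simp only [List.foldl_cons]
    by_cases hc : c = "#"
    · rw [if_pos hc, ih (out ++ shiftSegment seg ++ ["#"]) []]
      have hk : seg.count "O" ≤ seg.length := List.count_le_length
      have harg : (out ++ shiftSegment seg ++ ["#"]) ++ ([] : List String).map (fun c => if c = "O" then "." else c)
          = (out ++ seg.map (fun c => if c = "O" then "." else c)).take
              ((out ++ seg.map (fun c => if c = "O" then "." else c)).length - seg.count "O")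
            ++ List.replicate (seg.count "O") "O" ++ ["#"] := by
        have hln : (out ++ seg.map (fun c => if c = "O" then "." else c)).length - seg.count "O"
            = out.length + (seg.length - seg.count "O") := by simp; omega
        rw [hln, take_append_plus]
        simp [shiftSegment]
      rw [harg]
      conv_rhs => rw [slSpec, if_pos hc]
      simp
    · rw [if_neg hc, ih out (seg ++ [c])]
      by_cases ho : c = "O"
      · simp [slSpec, ho, List.count_append]
      · simp [slSpec, hc, ho, List.count_append]

-- ===== VERDICT (by name: the statement is the Claim_ definition above) =====
theorem shiftline_spec : Claim_equal_shiftline := by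
  intro line _
  unfold Spec_shiftline
  rw [shiftline_eq_fix_spec]
  have h := alt_eq_fix_spec line [] []
  simp only [List.map_nil, List.append_nil, List.count_nil] at h
  rw [shiftline_alt]
  exact h.symm
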